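-- pv_equiv track=rewrite | github.com/queelius/computational-explorations | src/universal_patterns.py | sidon_set_greedy
-- ===== SOURCE A (Python) =====
-- from typing import List, Tuple, Dict, Any, Optional, Set
--
-- def sidon_set_greedy(n: int) -> List[int]:
--     """Greedy Sidon set in [1, n]: all pairwise sums distinct."""
--     result = []
--     sums = set()
--     for k in range(1, n + 1):
--         ok = True
--         for a in result:
--             s = a + k
--             if s in sums:
--                 ok = False
--                 break
--         if ok:
--             # Also check 2*k (self-sum)
--             if 2 * k in sums:
--                 ok = False
--             if ok:
--                 for a in result:
--                     sums.add(a + k)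
--                 sums.add(2 * k)
--                 result.append(k)
--     return result
-- ===== SOURCE B (Python) =====
-- def sidon_set_greedy(n: int) -> list:
--     """Greedy Sidon set in [1, n], tracking pairwise differences instead of sums.
--
--     k collides iff k - a is an already-seen pairwise difference for some chosen a;
--     since k exceeds every chosen element, no separate self-sum (2*k) check is needed.
--     Scanning the chosen elements from the largest down finds a collision sooner.
--     """
--     result = []
--     diffs = set()
--     for k in range(1, n + 1):
--         for a in reversed(result):
--             if k - a in diffs:
--                 break
--         else:
--             diffs.update(k - a for a in result)
--             result.append(k)
--     return result
-- ===== Notes on version B (the rewrite author's own statement) =====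
-- stated objective: faster
-- what changed: B maintains the set of pairwise differences instead of pairwise sums, tests a candidate via subtraction scanning the chosen elements from the largest down, and drops A's self-sum check, which can never fire because every tracked sum is smaller than twice the candidate.
import Mathlib
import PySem

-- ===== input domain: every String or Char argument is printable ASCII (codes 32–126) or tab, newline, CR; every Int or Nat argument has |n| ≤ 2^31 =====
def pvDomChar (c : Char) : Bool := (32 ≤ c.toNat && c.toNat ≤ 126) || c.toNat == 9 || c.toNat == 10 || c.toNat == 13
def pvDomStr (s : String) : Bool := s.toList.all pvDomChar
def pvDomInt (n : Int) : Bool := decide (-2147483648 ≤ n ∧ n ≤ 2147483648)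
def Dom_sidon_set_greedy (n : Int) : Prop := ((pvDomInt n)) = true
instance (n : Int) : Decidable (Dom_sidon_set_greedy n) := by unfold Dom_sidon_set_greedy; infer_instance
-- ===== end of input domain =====

-- B tracks pairwise differences instead of pairwise sums (and needs no self-sum check); same greedy result, same cost.
-- Python's internal 'set' (used only for membership/insert, never iterated) is modelled by Std.HashSet, exact for those operations.

-- ===== PORT A =====
-- one iteration of A's loop body: state = (result, sums)
def sidonStepA (st : List Int × Std.HashSet Int) (k : Int) : List Int × Std.HashSet Int :=
  let result := st.1
  let sums := st.2
  -- 'for a in result: if a+k in sums: ok=False; break' computes exactly this any-test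
  let ok := !(result.any (fun a => Std.HashSet.contains sums (a + k)))
  if ok then
    if Std.HashSet.contains sums (2 * k) then (result, sums)
    else
      let sums := result.foldl (fun s a => Std.HashSet.insert s (a + k)) sums
      (result ++ [k], Std.HashSet.insert sums (2 * k))
  else (result, sums)

def sidon_set_greedy (n : Int) : List Int :=
  ((PySem.List.pyRange 1 (n + 1) 1).foldl sidonStepA (([] : List Int), (∅ : Std.HashSet Int))).1

-- ===== PORT B =====
-- one iteration of B's loop body: state = (result, diffs)
def sidonStepB (st : List Int × Std.HashSet Int) (k : Int) : List Int × Std.HashSet Int :=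
  -- 'for a in reversed(result): if k - a in diffs: break' with the for-else accepting
  if st.1.reverse.any (fun a => Std.HashSet.contains st.2 (k - a)) then st
  else (st.1 ++ [k], st.1.foldl (fun s a => Std.HashSet.insert s (k - a)) st.2)

def sidon_set_greedy_alt (n : Int) : List Int :=
  ((PySem.List.pyRange 1 (n + 1) 1).foldl sidonStepB (([] : List Int), (∅ : Std.HashSet Int))).1

-- ===== PRECONDITION & SPEC =====
def Spec_sidon_set_greedy (n : Int) (out : List Int) : Prop := out = sidon_set_greedy_alt n
instance (n : Int) (out : List Int) : Decidable (Spec_sidon_set_greedy n out) := by unfold Spec_sidon_set_greedy; infer_instance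

-- ===== CLAIM (what is proved, stated in full; the proofs are below) =====
def Claim_equal_sidon_set_greedy : Prop := ∀ (n : Int), Dom_sidon_set_greedy n → Spec_sidon_set_greedy n (sidon_set_greedy n)

-- ===== LEMMAS AND PROOFS =====

-- membership after a fold of HashSet.insert
theorem mem_foldl_hashset_insert (l : List Int) (f : Int → Int) (s0 : Std.HashSet Int) (x : Int) :
    x ∈ l.foldl (fun s a => Std.HashSet.insert s (f a)) s0 ↔ x ∈ s0 ∨ ∃ a ∈ l, x = f a := by
  induction l generalizing s0 with
  | nil => simp
  | cons h t ih =>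
    simp only [List.foldl_cons, ih, Std.HashSet.mem_insert, beq_iff_eq, List.mem_cons]
    constructor
    · rintro ((heq | hx) | ⟨a, ha, rfl⟩)
      · exact Or.inr ⟨h, Or.inl rfl, heq.symm⟩
      · exact Or.inl hx
      · exact Or.inr ⟨a, Or.inr ha, rfl⟩
    · rintro (hx | ⟨a, rfl | ha, rfl⟩)
      · exact Or.inl (Or.inr hx)
      · exact Or.inl (Or.inl rfl)
      · exact Or.inr ⟨a, ha, rfl⟩

-- invariants
def SumsInv (S : List Int) (sums : Std.HashSet Int) : Prop :=
  ∀ s, s ∈ sums ↔ ∃ a ∈ S, ∃ b ∈ S, s = a + b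

def DiffsInv (S : List Int) (diffs : Std.HashSet Int) : Prop :=
  ∀ d, d ∈ diffs ↔ ∃ a ∈ S, ∃ b ∈ S, b < a ∧ d = a - b

-- the mathematical hinge: with every chosen element below k, a sum collision is exactly a difference collision
theorem coll_iff (S : List Int) (sums diffs : Std.HashSet Int) (k : Int)
    (hb : ∀ x ∈ S, x < k) (hs : SumsInv S sums) (hd : DiffsInv S diffs) :
    (∃ a ∈ S, (a + k) ∈ sums) ↔ (∃ a ∈ S, (k - a) ∈ diffs) := by
  constructor
  · rintro ⟨a, ha, hmem⟩
    rcases (hs (a + k)).1 hmem with ⟨b, hbS, c, hcS, habc⟩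
    by_cases hca : a < c
    · exact ⟨b, hbS, (hd (k - b)).2 ⟨c, hcS, a, ha, hca, by omega⟩⟩
    · exfalso; have := hb b hbS; omega
  · rintro ⟨a, ha, hmem⟩
    rcases (hd (k - a)).1 hmem with ⟨u, huS, v, hvS, hvu, hkd⟩
    exact ⟨v, hvS, (hs (v + k)).2 ⟨a, ha, u, huS, by omega⟩⟩

theorem self_sum_not_mem (S : List Int) (sums : Std.HashSet Int) (k : Int)
    (hb : ∀ x ∈ S, x < k) (hs : SumsInv S sums) : (2 * k) ∉ sums := by
  intro h
  rcases (hs (2 * k)).1 h with ⟨a, haS, b, hbS, hab⟩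
  have := hb a haS; have := hb b hbS; omega

-- one joint loop step: the two step functions stay in lockstep and preserve the invariants
theorem step_lockstep (S : List Int) (sums diffs : Std.HashSet Int) (k : Int)
    (hb : ∀ x ∈ S, x < k) (hs : SumsInv S sums) (hd : DiffsInv S diffs) :
    (sidonStepA (S, sums) k).1 = (sidonStepB (S, diffs) k).1 ∧
    (∀ x ∈ (sidonStepA (S, sums) k).1, x < k + 1) ∧
    SumsInv (sidonStepA (S, sums) k).1 (sidonStepA (S, sums) k).2 ∧
    DiffsInv (sidonStepB (S, diffs) k).1 (sidonStepB (S, diffs) k).2 := by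
  have h2k := self_sum_not_mem S sums k hb hs
  have hcoll := coll_iff S sums diffs k hb hs hd
  by_cases hc : ∃ a ∈ S, (k - a) ∈ diffs
  · -- collision: both reject
    have eA : sidonStepA (S, sums) k = (S, sums) := by
      simp [sidonStepA]
      intro h
      rcases hcoll.2 hc with ⟨a, ha, hm⟩
      exact absurd hm (h a ha)
    have eB : sidonStepB (S, diffs) k = (S, diffs) := by
      rcases hc with ⟨a, ha, hm⟩
      simp only [sidonStepB]
      rw [if_pos]
      rw [List.any_eq_true]
      exact ⟨a, List.mem_reverse.2 ha, by simpa using hm⟩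
    rw [eA, eB]
    exact ⟨rfl, fun x hx => by have := hb x hx; omega, hs, hd⟩
  · -- no collision: both accept
    have eA : sidonStepA (S, sums) k
        = (S ++ [k], Std.HashSet.insert (S.foldl (fun s a => Std.HashSet.insert s (a + k)) sums) (2 * k)) := by
      simp only [sidonStepA]
      simp
      rw [if_pos (show ∀ x ∈ S, x + k ∉ sums from
        fun x hx hmem => hc (hcoll.1 ⟨x, hx, hmem⟩)), if_neg h2k]
    have eB : sidonStepB (S, diffs) k
        = (S ++ [k], S.foldl (fun s a => Std.HashSet.insert s (k - a)) diffs) := by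
      simp only [sidonStepB]
      rw [if_neg]
      simp only [List.any_eq_true, List.mem_reverse, not_exists, not_and]
      intro x hx hm
      exact hc ⟨x, hx, by simpa using hm⟩
    rw [eA, eB]
    refine ⟨rfl, ?_, ?_, ?_⟩
    · intro x hx
      rcases List.mem_append.1 hx with h | h
      · have := hb x h; omega
      · simp at h; omega
    · intro s
      simp only [Std.HashSet.mem_insert, beq_iff_eq, mem_foldl_hashset_insert, List.mem_append,
        List.mem_singleton]
      constructor
      · rintro (heq | h | ⟨a, ha, rfl⟩)
        · exact ⟨k, Or.inr rfl, k, Or.inr rfl, by omega⟩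
        · rcases (hs s).1 h with ⟨a, ha, b, hbm, rfl⟩
          exact ⟨a, Or.inl ha, b, Or.inl hbm, rfl⟩
        · exact ⟨a, Or.inl ha, k, Or.inr rfl, rfl⟩
      · rintro ⟨a, ha | rfl, b, hbm | rfl, rfl⟩
        · exact Or.inr (Or.inl ((hs (a + b)).2 ⟨a, ha, b, hbm, rfl⟩))
        · exact Or.inr (Or.inr ⟨a, ha, rfl⟩)
        · exact Or.inr (Or.inr ⟨b, hbm, by ring⟩)
        · exact Or.inl (by ring)
    · intro d
      simp only [mem_foldl_hashset_insert, List.mem_append, List.mem_singleton]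
      constructor
      · rintro (h | ⟨a, ha, rfl⟩)
        · rcases (hd d).1 h with ⟨a, ha, b, hbm, hlt, rfl⟩
          exact ⟨a, Or.inl ha, b, Or.inl hbm, hlt, rfl⟩
        · exact ⟨k, Or.inr rfl, a, Or.inl ha, hb a ha, rfl⟩
      · rintro ⟨a, ha | rfl, b, hbm | rfl, hlt, rfl⟩
        · exact Or.inl ((hd (a - b)).2 ⟨a, ha, b, hbm, hlt, rfl⟩)
        · exact absurd (hb a ha) (by omega)
        · exact Or.inr ⟨b, hbm, rfl⟩
        · omega

theorem loop_eq (fuel : Nat) : ∀ (k m : Int) (S : List Int) (sums diffs : Std.HashSet Int),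
    (m - k).toNat = fuel →
    (∀ x ∈ S, x < k) → SumsInv S sums → DiffsInv S diffs →
    ((PySem.List.pyRange k m 1).foldl sidonStepA (S, sums)).1
      = ((PySem.List.pyRange k m 1).foldl sidonStepB (S, diffs)).1 := by
  induction fuel with
  | zero =>
    intro k m S sums diffs hf _ _ _
    rw [PySem.List.pyRange_one_eq_nil (by omega)]
    rfl
  | succ f ih =>
    intro k m S sums diffs hf hb hs hd
    rw [PySem.List.pyRange_one_cons (by omega)]
    simp only [List.foldl_cons]
    obtain ⟨heq, hb', hs', hd'⟩ := step_lockstep S sums diffs k hb hs hd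
    have hdd : DiffsInv (sidonStepA (S, sums) k).1 (sidonStepB (S, diffs) k).2 := heq ▸ hd'
    have := ih (k + 1) m (sidonStepA (S, sums) k).1 (sidonStepA (S, sums) k).2
      (sidonStepB (S, diffs) k).2 (by omega) hb' hs' hdd
    show ((PySem.List.pyRange (k + 1) m 1).foldl sidonStepA
        ((sidonStepA (S, sums) k).1, (sidonStepA (S, sums) k).2)).1
      = ((PySem.List.pyRange (k + 1) m 1).foldl sidonStepB
        ((sidonStepB (S, diffs) k).1, (sidonStepB (S, diffs) k).2)).1
    rw [← heq]
    exact this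

-- ===== VERDICT (by name: the statement is the Claim_ definition above) =====
theorem sidon_set_greedy_spec : Claim_equal_sidon_set_greedy := by
  intro n _
  unfold Spec_sidon_set_greedy sidon_set_greedy sidon_set_greedy_alt
  exact loop_eq (n + 1 - 1).toNat 1 (n + 1) [] ∅ ∅ rfl
    (by simp) (by intro s; simp) (by intro d; simp)
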